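-- pv_equiv track=rewrite | github.com/njeans/pktransfer | pktransfer/demo.py | get_number_hex
-- ===== SOURCE A (Python) =====
-- def get_number_hex(values,reverse_values=True):
--     total = 0
--     final_values = values
--     if reverse_values:
--         final_values = reversed(values)
--     for val in final_values:
--         total = (total << 8) + val
--     return hex(total)
-- ===== SOURCE B (Python) =====
-- def get_number_hex(values, reverse_values=True):
--     # B: divide-and-conquer over the big-endian-ordered list instead of A's sequential shift-add loop.
--     ordered = values[::-1] if reverse_values else list(values)
--
--     def be_value(seq):
--         if len(seq) <= 1:
--             return seq[0] if seq else 0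
--         mid = len(seq) // 2
--         left, right = seq[:mid], seq[mid:]
--         return be_value(left) * 256 ** len(right) + be_value(right)
--
--     return hex(be_value(ordered))
-- ===== Notes on version B (the rewrite author's own statement) =====
-- stated objective: faster
-- what changed: Replaces A's sequential shift-accumulate loop with a divide-and-conquer helper that splits the big-endian-ordered list into halves and combines high * 256**len(low) + low, so big integers are built by balanced multiplications instead of n appends to one huge accumulator.
import Mathlib
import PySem

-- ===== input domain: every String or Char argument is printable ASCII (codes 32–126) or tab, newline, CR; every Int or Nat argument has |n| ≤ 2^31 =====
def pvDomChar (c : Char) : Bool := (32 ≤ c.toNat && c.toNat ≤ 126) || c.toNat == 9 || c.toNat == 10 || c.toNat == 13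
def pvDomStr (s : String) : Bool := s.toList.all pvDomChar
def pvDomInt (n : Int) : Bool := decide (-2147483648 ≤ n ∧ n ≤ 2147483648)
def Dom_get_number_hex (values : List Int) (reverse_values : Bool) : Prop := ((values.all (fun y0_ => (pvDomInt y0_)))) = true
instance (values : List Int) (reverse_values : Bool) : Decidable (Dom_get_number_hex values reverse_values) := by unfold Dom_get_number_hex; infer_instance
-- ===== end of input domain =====

-- B replaces A's sequential shift-accumulate loop by a divide-and-conquer helper that halves the
-- big-endian-ordered list and combines high * 256^len(low) + low (objective: faster, measured).

-- Python's hex(): "0x"/"-0x" prefix, lowercase digits (shared helper for both ports; exact for all Int)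
def pyHex (n : Int) : String :=
  (if n < 0 then "-0x" else "0x") ++ String.ofList (Nat.toDigits 16 n.natAbs)

-- ===== PORT A =====
-- Python's `total << 8` on int is exactly multiplication by 2^8 (the shift is the literal 8)
def get_number_hex (values : List Int) (reverse_values : Bool) : String :=
  let final_values := if reverse_values then values.reverse else values
  let total := final_values.foldl (fun (total val : Int) => total * 2 ^ 8 + val) 0
  pyHex total

-- ===== PORT B =====
-- B's recursive helper `be_value`: big-endian integer value of the list by halving.
-- The Nat argument is fuel = an upper bound on the length, only there to make the
-- recursion structural; beValue supplies seq.length and the fuel never runs out.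
def beValueFuel : Nat → List Int → Int
  | _, [] => 0
  | 0, v :: _ => v
  | n + 1, seq =>
    if seq.length ≤ 1 then
      match seq with
      | [] => 0
      | v :: _ => v
    else
      let mid := seq.length / 2
      beValueFuel n (seq.take mid) * 256 ^ (seq.drop mid).length + beValueFuel n (seq.drop mid)

def beValue (seq : List Int) : Int := beValueFuel seq.length seq

def get_number_hex_alt (values : List Int) (reverse_values : Bool) : String :=
  let ordered := if reverse_values then values.reverse else values
  pyHex (beValue ordered)

-- ===== PRECONDITION & SPEC =====
def Spec_get_number_hex (values : List Int) (reverse_values : Bool) (out : String) : Prop := out = get_number_hex_alt values reverse_values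
instance (values : List Int) (reverse_values : Bool) (out : String) : Decidable (Spec_get_number_hex values reverse_values out) := by unfold Spec_get_number_hex; infer_instance

-- ===== CLAIM (what is proved, stated in full; the proofs are below) =====
def Claim_equal_get_number_hex : Prop := ∀ (values : List Int) (reverse_values : Bool), Dom_get_number_hex values reverse_values → Spec_get_number_hex values reverse_values (get_number_hex values reverse_values)

-- ===== LEMMAS AND PROOFS =====

-- A's fold starting from accumulator a factors as a * 256^len + the fold from 0
theorem foldl_horner (l : List Int) (a : Int) :
    l.foldl (fun (total val : Int) => total * 2 ^ 8 + val) a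
      = a * 256 ^ l.length + l.foldl (fun (total val : Int) => total * 2 ^ 8 + val) 0 := by
  induction l generalizing a with
  | nil => simp
  | cons x xs ih =>
    simp only [List.foldl_cons, List.length_cons]
    rw [ih (a * 2 ^ 8 + x), ih ((0 : Int) * 2 ^ 8 + x)]
    ring

-- B's divide-and-conquer computes the same value as A's loop (induction on the fuel)
theorem beValueFuel_eq_foldl (n : Nat) (l : List Int) (hn : l.length ≤ n) :
    beValueFuel n l = l.foldl (fun (total val : Int) => total * 2 ^ 8 + val) 0 := by
  induction n generalizing l with
  | zero =>
    have : l = [] := List.length_eq_zero_iff.mp (Nat.le_zero.mp hn)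
    subst this; simp [beValueFuel]
  | succ n ih =>
    match l with
    | [] => simp [beValueFuel]
    | x :: xs =>
      rw [beValueFuel]
      by_cases h : (x :: xs).length ≤ 1
      · rw [if_pos h]
        match xs with
        | [] => norm_num
        | y :: r => simp at h
      · rw [if_neg h]
        have hlen : (x :: xs).length ≤ n + 1 := hn
        have h1 := ih ((x :: xs).take ((x :: xs).length / 2)) (by rw [List.length_take]; simp only [List.length_cons] at h hn ⊢; omega)
        have h2 := ih ((x :: xs).drop ((x :: xs).length / 2)) (by rw [List.length_drop]; simp only [List.length_cons] at h hn ⊢; omega)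
        show beValueFuel n ((x :: xs).take ((x :: xs).length / 2))
              * 256 ^ ((x :: xs).drop ((x :: xs).length / 2)).length
              + beValueFuel n ((x :: xs).drop ((x :: xs).length / 2)) = _
        rw [h1, h2, ← foldl_horner, ← List.foldl_append, List.take_append_drop]

theorem beValue_eq_foldl (l : List Int) :
    beValue l = l.foldl (fun (total val : Int) => total * 2 ^ 8 + val) 0 :=
  beValueFuel_eq_foldl l.length l le_rfl

-- ===== VERDICT (by name: the statement is the Claim_ definition above) =====
theorem get_number_hex_spec : Claim_equal_get_number_hex := by
  intro values reverse_values _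
  unfold Spec_get_number_hex get_number_hex get_number_hex_alt
  exact congrArg pyHex (beValue_eq_foldl _).symm
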